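-- pv_equiv track=rewrite | github.com/RVDROU/NsiClaveille | files/TG_NSI/Cours/chap4_algorithmes/chap4-2_optimisation/codes/sac_dos.py | ens_des_parties
-- ===== SOURCE A (Python) =====
-- def binaire(n, nb) :
--     '''renvoie la valeur binaire de n sur nb bits'''
--     n_bin = bin(n)[2:]
--     return '0'* (nb-len(n_bin)) + n_bin
--
-- def ens_des_parties(ensemble) :
--     '''Construit toutes les combinaisons possibles de l'ensemble
--     retour : liste des ensembles (liste de combinaisons)
--     '''
--     n = 2**len(ensemble)
--     combinaisons =[]
--     for i in range(1, n) :
--         sous_ensemble = []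
--         n_bin = binaire(i, len(ensemble))
--         for j in range(len(n_bin)) :
--             if n_bin[j] == '1' :
--                 sous_ensemble.append(ensemble[j])
--         combinaisons.append(sous_ensemble)
--     return combinaisons
-- ===== SOURCE B (Python) =====
-- def ens_des_parties(ensemble):
--     '''Recursive power-set construction instead of binary counting; same order, empty set dropped.'''
--     def parties(l):
--         if not l:
--             return [[]]
--         rest = parties(l[1:])
--         return rest + [[l[0]] + s for s in rest]
--     return parties(ensemble)[1:]
-- ===== Notes on version B (the rewrite author's own statement) =====
-- stated objective: alternative
-- what changed: Replaces the binary-counter enumeration (build an n-bit string for each i in 1..2^n-1 and scan its characters) by a structural recursion on the list: subsets of the tail, then the head prepended to each, dropping the single leading empty set.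
import Mathlib
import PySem

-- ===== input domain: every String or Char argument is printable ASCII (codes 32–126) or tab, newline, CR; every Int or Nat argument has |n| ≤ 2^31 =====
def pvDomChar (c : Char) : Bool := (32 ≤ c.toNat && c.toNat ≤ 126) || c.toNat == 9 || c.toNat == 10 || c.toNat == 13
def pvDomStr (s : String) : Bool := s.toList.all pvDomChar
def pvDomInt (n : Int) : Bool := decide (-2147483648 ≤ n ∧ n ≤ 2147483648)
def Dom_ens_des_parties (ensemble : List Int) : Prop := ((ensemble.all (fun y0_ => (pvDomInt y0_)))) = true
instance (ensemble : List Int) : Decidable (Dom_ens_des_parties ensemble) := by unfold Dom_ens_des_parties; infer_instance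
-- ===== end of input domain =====

-- B replaces A's binary-counter enumeration by a structural recursion on the list (same output, same order).

-- ===== PORT A =====
-- digits of bin(n)[2:] for n ≥ 1, most significant first (empty for 0, as bin's recursion bottoms out)
def pyBinAux : Nat → List Char
  | 0 => []
  | n + 1 => pyBinAux ((n + 1) / 2) ++ [if (n + 1) % 2 = 1 then '1' else '0']

-- Python's bin(n)[2:] (bin(0) = '0b0')
def pyBin (n : Nat) : List Char := if n = 0 then ['0'] else pyBinAux n

-- helper binaire(n, nb): '0'*(nb-len(n_bin)) + n_bin, as a char list
def binaire (n nb : Nat) : List Char :=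
  List.replicate (nb - (pyBin n).length) '0' ++ pyBin n

-- inner loop: for j in range(len(n_bin)): if n_bin[j]=='1': sous_ensemble.append(ensemble[j])
-- (both indexings are always in range in A's use, so getD's default is never consulted)
def sousEnsemble (ensemble : List Int) (nbin : List Char) : List Int :=
  (List.range nbin.length).foldl
    (fun acc j => if nbin.getD j ' ' = '1' then acc ++ [ensemble.getD j 0] else acc) []

-- for i in range(1, 2**len(ensemble)): combinaisons.append(...)
def ens_des_parties (ensemble : List Int) : List (List Int) :=
  (List.range' 1 (2 ^ ensemble.length - 1)).foldl
    (fun comb i => comb ++ [sousEnsemble ensemble (binaire i ensemble.length)]) []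

-- ===== PORT B =====
-- parties(l): all subsets; without-head block first, then the head prepended to each
def parties : List Int → List (List Int)
  | [] => [[]]
  | x :: xs => parties xs ++ (parties xs).map (fun s => x :: s)

def ens_des_parties_alt (ensemble : List Int) : List (List Int) :=
  (parties ensemble).drop 1

-- ===== PRECONDITION & SPEC =====
def Spec_ens_des_parties (ensemble : List Int) (out : List (List Int)) : Prop := out = ens_des_parties_alt ensemble
instance (ensemble : List Int) (out : List (List Int)) : Decidable (Spec_ens_des_parties ensemble out) := by unfold Spec_ens_des_parties; infer_instance

-- ===== CLAIM (what is proved, stated in full; the proofs are below) =====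
def Claim_equal_ens_des_parties : Prop := ∀ (ensemble : List Int), Dom_ens_des_parties ensemble → Spec_ens_des_parties ensemble (ens_des_parties ensemble)

-- ===== LEMMAS AND PROOFS =====

-- the exact n-bit binary string of i (for i < 2^n), msb first
def bits : Nat → Nat → List Char
  | 0, _ => []
  | n + 1, i => bits n (i / 2) ++ [if i % 2 = 1 then '1' else '0']

-- char-list-driven selection, equal to A's inner index loop
def select : List Int → List Char → List Int
  | _, [] => []
  | ens, c :: cs => (if c = '1' then [ens.getD 0 0] else []) ++ select ens.tail cs

theorem foldl_append_singleton {α β : Type} (f : α → β) (l : List α) (acc : List β) :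
    l.foldl (fun c i => c ++ [f i]) acc = acc ++ l.map f := by
  induction l generalizing acc with
  | nil => simp
  | cons x xs ih => simp [List.foldl, ih]

theorem sousEnsemble_aux (ens : List Int) (nbin : List Char) (acc : List Int) :
    (List.range nbin.length).foldl
      (fun a j => if nbin.getD j ' ' = '1' then a ++ [ens.getD j 0] else a) acc
      = acc ++ select ens nbin := by
  induction nbin generalizing ens acc with
  | nil => simp [select]
  | cons c cs ih =>
      rw [List.length_cons, List.range_succ_eq_map]
      simp only [List.foldl_cons, List.foldl_map, List.getD_cons_zero, List.getD_cons_succ]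
      have hg : ∀ (j : Nat), ens.getD (j + 1) 0 = ens.tail.getD j 0 := by
        intro j; cases ens <;> simp
      simp only [hg]
      rw [ih ens.tail]
      by_cases hc : c = '1' <;> simp [select, hc]

theorem sousEnsemble_eq_select (ensemble : List Int) (nbin : List Char) :
    sousEnsemble ensemble nbin = select ensemble nbin := by
  simpa using sousEnsemble_aux ensemble nbin []

theorem bits_zero (n : Nat) : bits n 0 = List.replicate n '0' := by
  induction n with
  | zero => rfl
  | succ n ih => simp [bits, ih, List.replicate_succ']

theorem bits_lt (n i : Nat) (h : i < 2 ^ n) : bits (n + 1) i = '0' :: bits n i := by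
  induction n generalizing i with
  | zero =>
      have : i = 0 := by simpa using h
      subst this; rfl
  | succ n ih =>
      have hdiv : i / 2 < 2 ^ n := by
        have h2 : (2:Nat) ^ (n + 1) = 2 * 2 ^ n := by ring
        omega
      have e1 : bits (n + 1 + 1) i
          = bits (n + 1) (i / 2) ++ [if i % 2 = 1 then '1' else '0'] := rfl
      have e2 : bits (n + 1) i
          = bits n (i / 2) ++ [if i % 2 = 1 then '1' else '0'] := rfl
      rw [e1, ih _ hdiv, e2]; rfl

theorem bits_add_pow (n i : Nat) (h : i < 2 ^ n) :
    bits (n + 1) (2 ^ n + i) = '1' :: bits n i := by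
  induction n generalizing i with
  | zero =>
      have : i = 0 := by simpa using h
      subst this; rfl
  | succ n ih =>
      have h2 : (2:Nat) ^ (n + 1) = 2 * 2 ^ n := by ring
      have hdiv : i / 2 < 2 ^ n := by omega
      have hq : (2 ^ (n + 1) + i) / 2 = 2 ^ n + i / 2 := by omega
      have hr : (2 ^ (n + 1) + i) % 2 = i % 2 := by omega
      have e1 : bits (n + 1 + 1) (2 ^ (n + 1) + i)
          = bits (n + 1) ((2 ^ (n + 1) + i) / 2)
            ++ [if (2 ^ (n + 1) + i) % 2 = 1 then '1' else '0'] := rfl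
      have e2 : bits (n + 1) i
          = bits n (i / 2) ++ [if i % 2 = 1 then '1' else '0'] := rfl
      rw [e1, hq, hr, ih _ hdiv, e2]; rfl

theorem pyBinAux_len_bits (n : Nat) : ∀ i, 1 ≤ i → i < 2 ^ n →
    bits n i = List.replicate (n - (pyBinAux i).length) '0' ++ pyBinAux i := by
  induction n with
  | zero => intro i h1 h2; omega
  | succ n ih =>
      intro i h1 h2
      obtain ⟨m, rfl⟩ : ∃ m, i = m + 1 := ⟨i - 1, by omega⟩
      have ebits : bits (n + 1) (m + 1)
          = bits n ((m + 1) / 2) ++ [if (m + 1) % 2 = 1 then '1' else '0'] := rfl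
      have epy : pyBinAux (m + 1)
          = pyBinAux ((m + 1) / 2) ++ [if (m + 1) % 2 = 1 then '1' else '0'] := by
        simp only [pyBinAux]
      by_cases hq : (m + 1) / 2 = 0
      · have hm : m = 0 := by omega
        subst hm
        rw [ebits]
        simp [pyBinAux, bits_zero]
      · have h2' : (2:Nat) ^ (n + 1) = 2 * 2 ^ n := by ring
        have hdiv : (m + 1) / 2 < 2 ^ n := by omega
        rw [ebits, ih _ (by omega) hdiv, epy]
        rw [List.append_assoc]
        congr 1
        have : (pyBinAux ((m + 1) / 2) ++ [if (m + 1) % 2 = 1 then '1' else '0']).length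
            = (pyBinAux ((m + 1) / 2)).length + 1 := by simp
        rw [this]
        congr 1
        omega

theorem binaire_eq_bits (n i : Nat) (hn : 1 ≤ n) (h : i < 2 ^ n) :
    binaire i n = bits n i := by
  by_cases hi : i = 0
  · subst hi
    obtain ⟨m, rfl⟩ : ∃ m, n = m + 1 := ⟨n - 1, by omega⟩
    simp [binaire, pyBin, bits_zero, List.replicate_succ']
  · have h1 : 1 ≤ i := by omega
    rw [binaire, pyBin, if_neg hi, pyBinAux_len_bits n i h1 h]

theorem main_pow (ensemble : List Int) :
    (List.range (2 ^ ensemble.length)).map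
      (fun i => select ensemble (bits ensemble.length i)) = parties ensemble := by
  induction ensemble with
  | nil => decide
  | cons x xs ih =>
      have h2 : (2:Nat) ^ (xs.length + 1) = 2 ^ xs.length + 2 ^ xs.length := by ring
      rw [List.length_cons, h2, List.range_add, List.map_append, List.map_map]
      have hfst : (List.range (2 ^ xs.length)).map
          (fun i => select (x :: xs) (bits (xs.length + 1) i))
          = (List.range (2 ^ xs.length)).map (fun i => select xs (bits xs.length i)) := by
        apply List.map_congr_left
        intro i hi
        rw [bits_lt _ _ (List.mem_range.mp hi)]
        simp [select]
      have hsnd : (List.range (2 ^ xs.length)).map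
          ((fun i => select (x :: xs) (bits (xs.length + 1) i)) ∘ (fun j => 2 ^ xs.length + j))
          = (List.range (2 ^ xs.length)).map
            ((fun s => x :: s) ∘ (fun i => select xs (bits xs.length i))) := by
        apply List.map_congr_left
        intro i hi
        simp only [Function.comp]
        rw [bits_add_pow _ _ (List.mem_range.mp hi)]
        simp [select]
      rw [hfst, hsnd, ih, ← List.map_map, ih]
      rfl

-- ===== VERDICT (by name: the statement is the Claim_ definition above) =====
theorem ens_des_parties_spec : Claim_equal_ens_des_parties := by
  intro ensemble _
  unfold Spec_ens_des_parties ens_des_parties ens_des_parties_alt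
  cases ensemble with
  | nil => decide
  | cons x xs =>
      rw [foldl_append_singleton, List.nil_append, ← main_pow]
      have hm : 1 ≤ 2 ^ (x :: xs).length := Nat.one_le_two_pow
      rw [← List.map_drop]
      have hr : (List.range (2 ^ (x :: xs).length)).drop 1
          = List.range' 1 (2 ^ (x :: xs).length - 1) := by
        rw [List.range_eq_range']
        obtain ⟨m, hm'⟩ : ∃ m, 2 ^ (x :: xs).length = m + 1 := ⟨2 ^ (x :: xs).length - 1, by omega⟩
        rw [hm', List.range'_succ]
        simp
      rw [hr]
      apply List.map_congr_left
      intro i hi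
      rw [List.mem_range'_1] at hi
      have hi' : i < 2 ^ (x :: xs).length := by omega
      rw [sousEnsemble_eq_select,
        binaire_eq_bits (x :: xs).length i (by simp) hi']
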